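-- pv_equiv track=rewrite | github.com/arvid0528/discord-bot | wordfiles.py | negations_amount
-- ===== SOURCE A (Python) =====
-- def negations_amount(msg):
--     msg_as_word_list = msg.split(" ")
--
--     negations = [
--         "not", "isnt", "isn't", "aint", "dont", "don't", "no"
--     ]
--
--     negations_amount = 0
--
--     for word in msg_as_word_list:
--         if word in negations:
--             negations_amount += 1
--
--     return negations_amount
-- ===== SOURCE B (Python) =====
-- NEGATIONS = "not isnt isn't aint dont don't no".split(" ")
--
--
-- def negations_amount(msg):
--     words = msg.split(" ")
--     return sum(words.count(w) for w in NEGATIONS)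
-- ===== Notes on version B (the rewrite author's own statement) =====
-- stated objective: idiomatic
-- what changed: B inverts the traversal: instead of scanning each message word and testing membership in the negation list, it iterates over the seven negation words and sums words.count(w), the number of occurrences of each in the split message.
import Mathlib
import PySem

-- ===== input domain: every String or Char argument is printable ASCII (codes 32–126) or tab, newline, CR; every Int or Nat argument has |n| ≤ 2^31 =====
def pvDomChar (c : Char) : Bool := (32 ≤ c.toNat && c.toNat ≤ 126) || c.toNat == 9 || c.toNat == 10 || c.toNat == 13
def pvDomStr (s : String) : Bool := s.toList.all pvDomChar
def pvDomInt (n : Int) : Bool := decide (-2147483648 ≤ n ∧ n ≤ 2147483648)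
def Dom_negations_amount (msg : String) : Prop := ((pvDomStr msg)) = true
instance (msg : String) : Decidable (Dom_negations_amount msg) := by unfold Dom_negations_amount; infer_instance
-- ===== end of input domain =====

-- B iterates over the seven negation words and sums each one's occurrence count in the split message, instead of scanning message words against the negation list (idiomatic restructuring, same result).


-- ===== PORT A =====
-- msg.split(" ") ported as PySem.Chars.splitOn (exact: sep is the nonempty literal " ")
def negations_amount (msg : String) : Int :=
  let msg_as_word_list := PySem.Chars.splitOn msg.toList " ".toList
  let negations := ["not".toList, "isnt".toList, "isn't".toList, "aint".toList,
                    "dont".toList, "don't".toList, "no".toList]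
  msg_as_word_list.foldl (fun acc word => if negations.contains word then acc + 1 else acc) 0

-- ===== PORT B =====
-- module-level NEGATIONS = "not isnt isn't aint dont don't no".split(" ")
def NEGATIONS : List (List Char) :=
  PySem.Chars.splitOn "not isnt isn't aint dont don't no".toList " ".toList

-- sum over the negation words of words.count(w)
def negations_amount_alt (msg : String) : Int :=
  let words := PySem.Chars.splitOn msg.toList " ".toList
  (NEGATIONS.map (fun w => (PySem.List.count words w : Int))).sum

-- ===== PRECONDITION & SPEC =====
def Spec_negations_amount (msg : String) (out : Int) : Prop := out = negations_amount_alt msg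
instance (msg : String) (out : Int) : Decidable (Spec_negations_amount msg out) := by unfold Spec_negations_amount; infer_instance

-- ===== CLAIM (what is proved, stated in full; the proofs are below) =====
def Claim_equal_negations_amount : Prop := ∀ (msg : String), Dom_negations_amount msg → Spec_negations_amount msg (negations_amount msg)

-- ===== LEMMAS AND PROOFS =====

lemma countP_contains_cons {α : Type} [BEq α] [LawfulBEq α] (w : α) (negs : List α)
    (hw : negs.contains w = false) (ws : List α) :
    ws.countP (w :: negs).contains = ws.count w + ws.countP negs.contains := by
  induction ws with
  | nil => simp
  | cons x ws ih =>
    rw [List.countP_cons, List.countP_cons, List.count_cons, ih]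
    simp only [List.contains_cons]
    by_cases hxw : x == w
    · have hxw' : x = w := eq_of_beq hxw
      subst hxw'
      have hx : x ∉ negs := by simpa [List.contains_eq_mem] using hw
      simp [hx]
      omega
    · simp [hxw]
      omega

lemma countP_mem_eq_sum_count {α : Type} [BEq α] [LawfulBEq α] (negs : List α) (h : negs.Nodup)
    (ws : List α) :
    (ws.countP negs.contains : Int)
      = (negs.map (fun w => (ws.count w : Int))).sum := by
  induction negs with
  | nil => simp
  | cons w negs ih =>
    rcases List.nodup_cons.mp h with ⟨hw, hnd⟩
    have hw' : negs.contains w = false := by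
      simp only [List.contains_eq_mem, decide_eq_false_iff_not]; exact hw
    rw [countP_contains_cons w negs hw' ws]
    simp [← ih hnd]

lemma pysem_count_eq_count {α : Type} [BEq α] (ws : List α) (w : α) :
    PySem.List.count ws w = ws.count w := by
  simp [PySem.List.count, List.count]

lemma NEGATIONS_eq : NEGATIONS = ["not".toList, "isnt".toList, "isn't".toList,
    "aint".toList, "dont".toList, "don't".toList, "no".toList] := by decide

-- ===== VERDICT (by name: the statement is the Claim_ definition above) =====
theorem negations_amount_spec : Claim_equal_negations_amount := by
  intro msg _
  unfold Spec_negations_amount negations_amount negations_amount_alt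
  rw [PySem.List.foldl_if_add_one]
  simp only [NEGATIONS_eq, pysem_count_eq_count]
  rw [countP_mem_eq_sum_count (negs := ["not".toList, "isnt".toList, "isn't".toList,
    "aint".toList, "dont".toList, "don't".toList, "no".toList]) (by decide)]
  simp
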